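-- pv_equiv track=rewrite | github.com/Varun0113/medsearch-ai | app/assistant/uses_extraction.py | _strip_leading_phrases
-- ===== SOURCE A (Python) =====
-- _LEADING_PHRASES = (
--     "treatment of",
--     "prevention of",
--     "management of",
--     "relief of",
--     "used for",
--     "used to treat",
--     "used in",
--     "therapy of",
--     "indicated for",
--     "for treatment of",
-- )
--
-- def _strip_leading_phrases(text: str) -> str:
--     cleaned = text
--     changed = True
--     while changed:
--         changed = False
--         for phrase in _LEADING_PHRASES:
--             if cleaned.startswith(phrase + " "):
--                 cleaned = cleaned[len(phrase):].strip()
--                 changed = True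
--     return cleaned
-- ===== SOURCE B (Python) =====
-- _LEADING_PHRASES = (
--     "treatment of",
--     "prevention of",
--     "management of",
--     "relief of",
--     "used for",
--     "used to treat",
--     "used in",
--     "therapy of",
--     "indicated for",
--     "for treatment of",
-- )
--
-- def _strip_leading_phrases(text: str) -> str:
--     for phrase in _LEADING_PHRASES:
--         if text.startswith(phrase + " "):
--             return _strip_leading_phrases(text[len(phrase):].strip())
--     return text
-- ===== Notes on version B (the rewrite author's own statement) =====
-- stated objective: simpler
-- what changed: Replaces the while-changed fixpoint with a for loop over phrases that mutates state with a tail-recursive peeler: strip the first matching phrase and recurse on the stripped remainder, returning text unchanged when no phrase matches.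
import Mathlib
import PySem

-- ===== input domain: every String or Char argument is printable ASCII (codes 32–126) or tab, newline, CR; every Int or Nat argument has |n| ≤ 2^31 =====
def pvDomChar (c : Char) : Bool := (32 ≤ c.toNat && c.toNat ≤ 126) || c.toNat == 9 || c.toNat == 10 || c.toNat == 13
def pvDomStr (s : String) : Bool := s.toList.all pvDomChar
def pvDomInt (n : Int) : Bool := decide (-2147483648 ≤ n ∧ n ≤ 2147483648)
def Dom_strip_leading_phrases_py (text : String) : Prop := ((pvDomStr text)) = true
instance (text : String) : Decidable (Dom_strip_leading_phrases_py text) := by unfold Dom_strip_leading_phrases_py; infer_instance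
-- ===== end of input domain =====

-- B replaces A's while-changed/for-loop fixpoint with a direct recursive peeler (first
-- matching phrase stripped, recurse on the remainder); objective: simpler. Not faster.

-- the module constant _LEADING_PHRASES, shared by both ports
def pvPhrases : List String :=
  ["treatment of", "prevention of", "management of", "relief of", "used for",
   "used to treat", "used in", "therapy of", "indicated for", "for treatment of"]

-- cleaned[len(phrase):].strip() — the stripping step both Pythons contain verbatim
def pvStep (cleaned phrase : String) : String :=
  PySem.Str.strip (PySem.Str.slice cleaned (some (PySem.Str.len phrase)) none)

-- termination helper: stripping a nonempty matched phrase strictly shortens the text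
theorem pvStep_lt (t p : String) (hne : p.toList ≠ [])
    (hsw : PySem.Str.startswith t (p ++ " ") = true) :
    (pvStep t p).toList.length < t.toList.length := by
  have hpre : (p ++ " ").toList <+: t.toList := by
    have := (PySem.Chars.startswith_iff t.toList (p ++ " ").toList).mp hsw
    exact this
  have hlen : p.toList.length + 1 ≤ t.toList.length := by
    have := hpre.length_le
    simpa [String.toList_append] using this
  have hdrop : (PySem.Str.slice t (some (PySem.Str.len p)) none).toList
      = t.toList.drop p.toList.length := by
    simp [PySem.Str.len, PySem.List.slice_some_none]
  have hstrip : (pvStep t p).toList.length ≤ t.toList.length - p.toList.length := by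
    have h1 : (pvStep t p).toList = PySem.Chars.strip
        (PySem.Str.slice t (some (PySem.Str.len p)) none).toList := by
      simp [pvStep, PySem.Str.toList_strip]
    rw [h1, hdrop]
    have h2 : ∀ cs : List Char, (PySem.Chars.strip cs).length ≤ cs.length := by
      intro cs
      simp only [PySem.Chars.strip, PySem.Chars.rstrip, PySem.Chars.lstrip, List.length_reverse]
      calc (List.dropWhile PySem.Chars.isspace
              (List.dropWhile PySem.Chars.isspace cs).reverse).length
          ≤ (List.dropWhile PySem.Chars.isspace cs).reverse.length :=
            List.length_dropWhile_le _ _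
        _ ≤ cs.length := by
            simpa using List.length_dropWhile_le PySem.Chars.isspace cs
    simpa [List.length_drop] using h2 (t.toList.drop p.toList.length)
  have hp : 1 ≤ p.toList.length := by
    cases hcs : p.toList with
    | nil => exact absurd hcs hne
    | cons a l => simp
  omega

theorem pvPhrases_ne : ∀ p ∈ pvPhrases, p.toList ≠ [] := by decide

-- ===== PORT A =====
-- one full 'for phrase in _LEADING_PHRASES' pass over the (cleaned, changed) state
def pvPassA : List String → String × Bool → String × Bool
  | [], st => st
  | phrase :: rest, (cleaned, changed) =>
    if PySem.Str.startswith cleaned (phrase ++ " ") then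
      pvPassA rest (pvStep cleaned phrase, true)
    else
      pvPassA rest (cleaned, changed)

-- the pass never lengthens the text, and a pass that set changed strictly shortened it
theorem pvPassA_len (ps : List String) (hps : ∀ p ∈ ps, p.toList ≠ []) :
    ∀ (t : String) (c : Bool),
      (pvPassA ps (t, c)).1.toList.length ≤ t.toList.length ∧
      ((pvPassA ps (t, c)).2 = true →
        c = true ∨ (pvPassA ps (t, c)).1.toList.length < t.toList.length) := by
  induction ps with
  | nil => intro t c; simp [pvPassA]
  | cons p rest ih =>
    intro t c
    have hrest : ∀ q ∈ rest, q.toList ≠ [] := fun q hq => hps q (List.mem_cons_of_mem _ hq)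
    by_cases hsw : PySem.Str.startswith t (p ++ " ") = true
    · have hlt := pvStep_lt t p (hps p List.mem_cons_self) hsw
      have := ih hrest (pvStep t p) true
      simp only [pvPassA, hsw, if_pos]
      exact ⟨by omega, fun _ => Or.inr (by omega)⟩
    · have := ih hrest t c
      simp only [pvPassA, hsw, if_neg, Bool.false_eq_true, not_false_iff]
      exact this

-- while changed: run a pass; if it changed, loop on the new text, else return it
def strip_leading_phrases_py (text : String) : String :=
  let r := pvPassA pvPhrases (text, false)
  if hr : r.2 = true then strip_leading_phrases_py r.1 else r.1
termination_by text.toList.length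
decreasing_by
  have h := pvPassA_len pvPhrases pvPhrases_ne text false
  rcases h.2 hr with h' | h'
  · exact absurd h' (by simp)
  · exact h'

-- ===== PORT B =====
-- the for loop of B: first phrase whose 'phrase + " "' prefixes the text, if any
def pvFindPhrase : List String → String → Option String
  | [], _ => none
  | phrase :: rest, t =>
    if PySem.Str.startswith t (phrase ++ " ") then some phrase
    else pvFindPhrase rest t

theorem pvFindPhrase_some {ps : List String} {t p : String}
    (h : pvFindPhrase ps t = some p) :
    p ∈ ps ∧ PySem.Str.startswith t (p ++ " ") = true := by
  induction ps with
  | nil => simp [pvFindPhrase] at h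
  | cons q rest ih =>
    by_cases hsw : PySem.Str.startswith t (q ++ " ") = true
    · simp only [pvFindPhrase, hsw, if_pos, Option.some.injEq] at h
      subst h; exact ⟨List.mem_cons_self, hsw⟩
    · simp only [pvFindPhrase, hsw, if_neg, Bool.false_eq_true, not_false_iff] at h
      exact ⟨List.mem_cons_of_mem _ (ih h).1, (ih h).2⟩

-- recursive peeler: strip the matching phrase and recurse, else return unchanged
def strip_leading_phrases_py_alt (text : String) : String :=
  match hm : pvFindPhrase pvPhrases text with
  | some phrase => strip_leading_phrases_py_alt (pvStep text phrase)
  | none => text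
termination_by text.toList.length
decreasing_by
  have h := pvFindPhrase_some hm
  exact pvStep_lt text phrase (pvPhrases_ne phrase h.1) h.2

-- ===== PRECONDITION & SPEC =====
def Spec_strip_leading_phrases_py (text : String) (out : String) : Prop := out = strip_leading_phrases_py_alt text
instance (text : String) (out : String) : Decidable (Spec_strip_leading_phrases_py text out) := by unfold Spec_strip_leading_phrases_py; infer_instance

-- ===== CLAIM (what is proved, stated in full; the proofs are below) =====
def Claim_equal_strip_leading_phrases_py : Prop := ∀ (text : String), Dom_strip_leading_phrases_py text → Spec_strip_leading_phrases_py text (strip_leading_phrases_py text)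

-- ===== LEMMAS AND PROOFS =====

-- one-step unfolding equations for the loop bodies
theorem pvPassA_cons (p : String) (ps : List String) (t : String) (c : Bool) :
    pvPassA (p :: ps) (t, c) =
      if PySem.Str.startswith t (p ++ " ") then pvPassA ps (pvStep t p, true)
      else pvPassA ps (t, c) := rfl

theorem pvFindPhrase_cons (p : String) (ps : List String) (t : String) :
    pvFindPhrase (p :: ps) t =
      if PySem.Str.startswith t (p ++ " ") then some p else pvFindPhrase ps t := rfl


-- no phrase-plus-space is a prefix of another: at most one phrase can match a given text
theorem pvPhrases_no_prefix :
    ∀ p ∈ pvPhrases, ∀ q ∈ pvPhrases,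
      (p ++ " ").toList <+: (q ++ " ").toList → p = q := by decide

theorem pvMatch_unique {t p q : String} (hp : p ∈ pvPhrases) (hq : q ∈ pvPhrases)
    (h1 : PySem.Str.startswith t (p ++ " ") = true)
    (h2 : PySem.Str.startswith t (q ++ " ") = true) : p = q := by
  have hp1 : (p ++ " ").toList <+: t.toList :=
    (PySem.Chars.startswith_iff _ _).mp h1
  have hq1 : (q ++ " ").toList <+: t.toList :=
    (PySem.Chars.startswith_iff _ _).mp h2
  rcases List.prefix_or_prefix_of_prefix hp1 hq1 with h | h
  · exact pvPhrases_no_prefix p hp q hq h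
  · exact (pvPhrases_no_prefix q hq p hp h).symm

theorem pvFind_of_match {t p : String} (hp : p ∈ pvPhrases)
    (hsw : PySem.Str.startswith t (p ++ " ") = true) :
    pvFindPhrase pvPhrases t = some p := by
  have haux : ∀ ps : List String, (∀ q ∈ ps, q ∈ pvPhrases) → p ∈ ps →
      pvFindPhrase ps t = some p := by
    intro ps
    induction ps with
    | nil => intro _ h; simp at h
    | cons q rest ih =>
      intro hsub hmem
      by_cases hq : PySem.Str.startswith t (q ++ " ") = true
      · have hqp : q = p := pvMatch_unique (hsub q List.mem_cons_self) hp hq hsw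
        subst hqp
        rw [pvFindPhrase_cons, if_pos hq]
      · have hne : p ≠ q := fun h => hq (h ▸ hsw)
        have hmem' : p ∈ rest := by
          rcases List.mem_cons.mp hmem with h | h
          · exact absurd h hne
          · exact h
        simp only [pvFindPhrase, hq, if_neg, Bool.false_eq_true, not_false_iff]
        exact ih (fun r hr => hsub r (List.mem_cons_of_mem _ hr)) hmem'
  exact haux pvPhrases (fun _ h => h) hp

-- unfolding B when nothing matches
theorem pvAlt_none {t : String} (h : pvFindPhrase pvPhrases t = none) :
    strip_leading_phrases_py_alt t = t := by
  rw [strip_leading_phrases_py_alt]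
  split
  · rename_i phrase hm; rw [h] at hm; cases hm
  · rfl

-- unfolding B at a matched phrase
theorem pvAlt_step {t p : String} (hp : p ∈ pvPhrases)
    (hsw : PySem.Str.startswith t (p ++ " ") = true) :
    strip_leading_phrases_py_alt t = strip_leading_phrases_py_alt (pvStep t p) := by
  rw [strip_leading_phrases_py_alt]
  split
  · rename_i phrase hm
    have := pvFind_of_match hp hsw
    rw [this] at hm
    cases hm
    rfl
  · rename_i hm
    rw [pvFind_of_match hp hsw] at hm
    cases hm

-- B's value is invariant under any part of one of A's passes
theorem pvAlt_pass (ps : List String) (hsub : ∀ p ∈ ps, p ∈ pvPhrases) :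
    ∀ (t : String) (c : Bool),
      strip_leading_phrases_py_alt (pvPassA ps (t, c)).1 =
        strip_leading_phrases_py_alt t := by
  induction ps with
  | nil => intro t c; simp [pvPassA]
  | cons p rest ih =>
    intro t c
    have hrest : ∀ q ∈ rest, q ∈ pvPhrases := fun q hq => hsub q (List.mem_cons_of_mem _ hq)
    by_cases hsw : PySem.Str.startswith t (p ++ " ") = true
    · simp only [pvPassA, hsw, if_pos]
      rw [ih hrest (pvStep t p) true,
        pvAlt_step (hsub p List.mem_cons_self) hsw]
    · simp only [pvPassA, hsw, if_neg, Bool.false_eq_true, not_false_iff]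
      exact ih hrest t c

-- a pass that reports no change left the text unchanged and nothing matched
theorem pvPassA_snd_true (ps : List String) : ∀ t : String, (pvPassA ps (t, true)).2 = true := by
  induction ps with
  | nil => intro t; simp [pvPassA]
  | cons p rest ih =>
    intro t
    by_cases hsw : PySem.Str.startswith t (p ++ " ") = true
    · simp only [pvPassA, hsw, if_pos]; exact ih _
    · simp only [pvPassA, hsw, if_neg, Bool.false_eq_true, not_false_iff]; exact ih t

theorem pvPassA_of_false (ps : List String) :
    ∀ t : String, (pvPassA ps (t, false)).2 = false →
      (pvPassA ps (t, false)).1 = t ∧ pvFindPhrase ps t = none := by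
  induction ps with
  | nil => intro t _; simp [pvPassA, pvFindPhrase]
  | cons p rest ih =>
    intro t h
    by_cases hsw : PySem.Str.startswith t (p ++ " ") = true
    · exfalso
      simp only [pvPassA, hsw, if_pos] at h
      rw [pvPassA_snd_true rest (pvStep t p)] at h
      cases h
    · rw [pvPassA_cons, if_neg hsw] at h ⊢
      rcases ih t h with ⟨h1, h2⟩
      exact ⟨h1, by rw [pvFindPhrase_cons, if_neg hsw]; exact h2⟩

theorem pvMain : ∀ (n : Nat) (t : String), t.toList.length ≤ n →
    strip_leading_phrases_py t = strip_leading_phrases_py_alt t := by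
  intro n
  induction n with
  | zero =>
    intro t ht
    have hlen := pvPassA_len pvPhrases pvPhrases_ne t false
    by_cases hr : (pvPassA pvPhrases (t, false)).2 = true
    · rcases hlen.2 hr with h | h
      · exact absurd h (by simp)
      · exact absurd h (by omega)
    · rcases pvPassA_of_false pvPhrases t (Bool.not_eq_true _ |>.mp hr) with ⟨h1, h2⟩
      rw [strip_leading_phrases_py, dif_neg hr, h1, pvAlt_none h2]
  | succ n ihn =>
    intro t ht
    by_cases hr : (pvPassA pvPhrases (t, false)).2 = true
    · have hlen := pvPassA_len pvPhrases pvPhrases_ne t false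
      rcases hlen.2 hr with h | h
      · exact absurd h (by simp)
      · rw [strip_leading_phrases_py, dif_pos hr, ihn _ (by omega)]
        exact pvAlt_pass pvPhrases (fun _ h => h) t false
    · rcases pvPassA_of_false pvPhrases t (Bool.not_eq_true _ |>.mp hr) with ⟨h1, h2⟩
      rw [strip_leading_phrases_py, dif_neg hr, h1, pvAlt_none h2]

-- ===== VERDICT (by name: the statement is the Claim_ definition above) =====
theorem strip_leading_phrases_py_spec : Claim_equal_strip_leading_phrases_py := by
  intro text _
  unfold Spec_strip_leading_phrases_py
  exact pvMain text.toList.length text le_rfl
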